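-- pv_equiv track=rewrite | github.com/LEE-sh1673/Programmers-Algorithms | 프로그래머스/1/42840. 모의고사/모의고사.py | solution
-- ===== SOURCE A (Python) =====
-- def solution(answers):
--     answer = []
--     n = len(answers)
--
--     u1 = [1,2,3,4,5] * n
--     u2 = [2,1,2,3,2,4,2,5] * n
--     u3 = [3,3,1,1,2,2,4,4,5,5] * n
--     cnts = [0] * 3
--
--     for i in range(n):
--         ans = answers[i]
--
--         if ans == u1[i]:
--             cnts[0] += 1
--         if ans == u2[i]:
--             cnts[1] += 1
--         if ans == u3[i]:
--             cnts[2] += 1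
--
--     return [idx+1 for idx, el in enumerate(cnts) if el == max(cnts)]
-- ===== SOURCE B (Python) =====
-- def solution(answers):
--     # Pattern-agnostic histogram pass: count occurrences of each
--     # (position mod 40, answer) pair once; 40 = lcm(5, 8, 10), so each
--     # pattern's expected answer depends only on the position mod 40.
--     hist = {}
--     for i, a in enumerate(answers):
--         key = (i % 40, a)
--         hist[key] = hist.get(key, 0) + 1
--     patterns = [[1, 2, 3, 4, 5],
--                 [2, 1, 2, 3, 2, 4, 2, 5],
--                 [3, 3, 1, 1, 2, 2, 4, 4, 5, 5]]
--     # Score each pattern with a fixed 40-term lookup sum, no pass over answers.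
--     cnts = [sum(hist.get((r, p[r % len(p)]), 0) for r in range(40))
--             for p in patterns]
--     return [idx + 1 for idx, el in enumerate(cnts) if el == max(cnts)]
-- ===== Notes on version B (the rewrite author's own statement) =====
-- stated objective: alternative
-- what changed: B replaces A's per-element comparison against three n-fold replicated pattern lists by a pattern-agnostic histogram pass (a dict counting (position mod 40, answer) pairs, 40 = lcm of the pattern lengths) followed by a fixed 40-term lookup sum per pattern, so no pass over answers mentions any pattern.
import Mathlib
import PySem

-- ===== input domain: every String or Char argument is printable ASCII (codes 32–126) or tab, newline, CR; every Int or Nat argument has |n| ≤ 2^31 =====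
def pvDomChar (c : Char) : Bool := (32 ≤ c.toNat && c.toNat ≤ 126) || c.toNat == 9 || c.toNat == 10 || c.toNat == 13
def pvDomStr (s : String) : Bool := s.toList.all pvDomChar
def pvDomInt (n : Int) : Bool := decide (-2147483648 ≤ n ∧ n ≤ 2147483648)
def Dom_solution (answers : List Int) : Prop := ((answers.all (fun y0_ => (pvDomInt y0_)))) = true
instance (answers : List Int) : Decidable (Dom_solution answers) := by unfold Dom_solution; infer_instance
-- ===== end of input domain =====

-- B replaces A's per-element comparison against three replicated pattern lists by a
-- pattern-agnostic histogram of (position mod 40, answer) pairs plus a fixed 40-term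
-- lookup sum per pattern (alternative decomposition; same O(n) time).

-- ===== PORT A =====
-- literal port: u1/u2/u3 are the patterns replicated n times ([1,2,3,4,5] * n …);
-- the 3-cell list cnts is ported as a triple of counters, updated by the same three
-- independent ifs; indices i are always in range, so pyGetD's default is never read.
def solution (answers : List Int) : List Int :=
  let n := answers.length
  let u1 : List Int := (List.replicate n ([1,2,3,4,5] : List Int)).flatten
  let u2 : List Int := (List.replicate n ([2,1,2,3,2,4,2,5] : List Int)).flatten
  let u3 : List Int := (List.replicate n ([3,3,1,1,2,2,4,4,5,5] : List Int)).flatten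
  let cnts :=
    (PySem.List.pyRange 0 (n : Int) 1).foldl
      (fun (c : Int × Int × Int) i =>
        let ans := PySem.List.pyGetD answers i 0
        ((if ans = PySem.List.pyGetD u1 i 0 then c.1 + 1 else c.1),
         (if ans = PySem.List.pyGetD u2 i 0 then c.2.1 + 1 else c.2.1),
         (if ans = PySem.List.pyGetD u3 i 0 then c.2.2 + 1 else c.2.2)))
      (0, 0, 0)
  let cntsL : List Int := [cnts.1, cnts.2.1, cnts.2.2]
  let m := (PySem.List.max? cntsL (fun y => y)).getD 0
  ((PySem.List.enumerate cntsL).filter (fun q => q.2 = m)).map (fun q => q.1 + 1)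

-- ===== PORT B =====
-- port of Source B: the dict 'hist' over keys (i % 40, a) built with hist.get(key,0)+1,
-- then a 40-term lookup sum per pattern; sum(...) over range(40) is the foldl below.
def solution_alt (answers : List Int) : List Int :=
  let hist : PySem.Dict (Int × Int) Int :=
    (PySem.List.enumerate answers).foldl
      (fun d ia =>
        let key := (PySem.Int.mod ia.1 40, ia.2)
        d.insert key (d.getD key 0 + 1))
      PySem.Dict.empty
  let patterns : List (List Int) :=
    [[1,2,3,4,5], [2,1,2,3,2,4,2,5], [3,3,1,1,2,2,4,4,5,5]]
  let cnts := patterns.map (fun p =>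
    (PySem.List.pyRange 0 40 1).foldl
      (fun s r =>
        s + hist.getD (r, PySem.List.pyGetD p (PySem.Int.mod r (p.length : Int)) 0) 0)
      0)
  let m := (PySem.List.max? cnts (fun y => y)).getD 0
  ((PySem.List.enumerate cnts).filter (fun q => q.2 = m)).map (fun q => q.1 + 1)

-- ===== PRECONDITION & SPEC =====
def Spec_solution (answers : List Int) (out : List Int) : Prop := out = solution_alt answers
instance (answers : List Int) (out : List Int) : Decidable (Spec_solution answers out) := by unfold Spec_solution; infer_instance

-- ===== CLAIM (what is proved, stated in full; the proofs are below) =====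
def Claim_equal_solution : Prop := ∀ (answers : List Int), Dom_solution answers → Spec_solution answers (solution answers)

-- ===== LEMMAS AND PROOFS =====

-- a foldl of three componentwise counter updates is the triple of three independent foldls
theorem pv_foldl_triple (l : List Int) (P1 P2 P3 : Int → Prop)
    [DecidablePred P1] [DecidablePred P2] [DecidablePred P3] (a b c : Int) :
    l.foldl (fun (s : Int × Int × Int) i =>
        ((if P1 i then s.1 + 1 else s.1),
         (if P2 i then s.2.1 + 1 else s.2.1),
         (if P3 i then s.2.2 + 1 else s.2.2))) (a, b, c)
      = (l.foldl (fun a i => if P1 i then a + 1 else a) a,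
         l.foldl (fun a i => if P2 i then a + 1 else a) b,
         l.foldl (fun a i => if P3 i then a + 1 else a) c) := by
  induction l generalizing a b c with
  | nil => rfl
  | cons x t ih => simp only [List.foldl_cons]; rw [ih]

-- a counting loop is a countP
theorem pv_foldl_ite_count {alpha : Type} (cond : alpha → Prop) [DecidablePred cond] :
    ∀ (l : List alpha) (a : Int),
      l.foldl (fun acc x => if cond x then acc + 1 else acc) a
        = a + (l.countP (fun x => decide (cond x)) : Int) := by
  intro l
  induction l with
  | nil => intro a; simp
  | cons x t ih =>
    intro a
    rw [List.foldl_cons, ih, List.countP_cons]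
    by_cases h : cond x
    · simp [h]; ring
    · simp [h]

-- indexing the n-fold replication of a nonempty pattern is cyclic indexing of the pattern
theorem pv_getD_flatten_replicate (p : List Int) (hp : p ≠ []) :
    ∀ (m k : Nat), k < m * p.length →
      ((List.replicate m p).flatten).getD k 0 = p.getD (k % p.length) 0 := by
  intro m
  induction m with
  | zero => intro k hk; omega
  | succ m ih =>
    intro k hk
    have hlen : 0 < p.length := List.length_pos_iff.mpr hp
    rw [List.replicate_succ, List.flatten_cons]
    by_cases h : k < p.length
    · rw [List.getD_append _ _ _ _ h, Nat.mod_eq_of_lt h]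
    · rw [Nat.not_lt] at h
      have hmul : (m + 1) * p.length = m * p.length + p.length := by ring
      rw [List.getD_append_right _ _ _ _ h, ih (k - p.length) (by omega)]
      congr 1
      conv_rhs => rw [show k = (k - p.length) + p.length by omega]
      rw [Nat.add_mod_right]

-- the common value of both scoring methods: matches of pattern p against answers
def pvC (p : List Int) (answers : List Int) : Int :=
  ((List.range answers.length).countP
      (fun k => decide (answers.getD k 0 = p.getD (k % p.length) 0)) : Int)

-- A's per-pattern counter equals pvC
theorem pv_A_count (answers p : List Int) (hp : p ≠ []) :
    (PySem.List.pyRange 0 (answers.length : Int) 1).foldl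
        (fun a i => if PySem.List.pyGetD answers i 0
                      = PySem.List.pyGetD ((List.replicate answers.length p).flatten) i 0
                    then a + 1 else a) 0
      = pvC p answers := by
  have hlen : 0 < p.length := List.length_pos_iff.mpr hp
  rw [pv_foldl_ite_count
      (fun i : Int => PySem.List.pyGetD answers i 0
        = PySem.List.pyGetD ((List.replicate answers.length p).flatten) i 0)]
  rw [PySem.List.pyRange_zero_natCast, List.countP_map]
  unfold pvC
  rw [zero_add]
  congr 1
  apply List.countP_congr
  intro k hk
  have hk' : k < answers.length := List.mem_range.mp hk
  simp only [Function.comp, PySem.List.pyGetD_natCast, decide_eq_true_eq]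
  rw [pv_getD_flatten_replicate p hp answers.length k (by nlinarith)]

-- summing the indicator of 'k = (r, f r)' over a list of distinct r's
theorem pv_sum_indicator (f : Int → Int) (k : Int × Int) :
    ∀ (L : List Int), L.Nodup →
      (L.map (fun r => (if k = (r, f r) then (1 : Int) else 0))).sum
        = if k.1 ∈ L ∧ k.2 = f k.1 then 1 else 0 := by
  intro L
  induction L with
  | nil => intro _; simp
  | cons r t ih =>
    intro hnd
    rw [List.nodup_cons] at hnd
    rw [List.map_cons, List.sum_cons, ih hnd.2]
    by_cases h : k = (r, f r)
    · subst h
      simp [hnd.1]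
    · have h1 : ¬ (k.1 = r ∧ k.2 = f k.1) := by
        rintro ⟨h1, h2⟩
        exact h (Prod.ext h1 (by rw [h2, h1]))
      simp only [h, if_false, List.mem_cons, zero_add]
      by_cases h2 : k.1 ∈ t ∧ k.2 = f k.1
      · simp [h2]
      · have : ¬ ((k.1 = r ∨ k.1 ∈ t) ∧ k.2 = f k.1) := by
          rintro ⟨hc, hv⟩
          rcases hc with hc | hc
          · exact h1 ⟨hc, hv⟩
          · exact h2 ⟨hc, hv⟩
        rw [if_neg h2, if_neg this]

-- summing counts of the keys (r, f r) over distinct r's is one countP over the key list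
theorem pv_sum_count (f : Int → Int) (L : List Int) (hL : L.Nodup) :
    ∀ (keys : List (Int × Int)),
      (L.map (fun r => ((keys.count (r, f r)) : Int))).sum
        = (keys.countP (fun k => decide (k.1 ∈ L ∧ k.2 = f k.1)) : Int) := by
  intro keys
  induction keys with
  | nil => simp
  | cons k t ih =>
    have hmap : (L.map (fun r => (((k :: t).count (r, f r)) : Int)))
        = L.map (fun r => ((t.count (r, f r) : Int) + if k = (r, f r) then 1 else 0)) := by
      apply List.map_congr_left
      intro r _
      rw [List.count_cons]
      push_cast
      congr 1
      by_cases h : k = (r, f r)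
      · simp [h]
      · simp [h]
    rw [hmap, PySem.List.sum_map_add_int, ih,
        pv_sum_indicator f k L hL, List.countP_cons]
    by_cases h : k.1 ∈ L ∧ k.2 = f k.1
    · simp [h]
    · simp [h]

-- B's 40-term lookup sum for one pattern equals pvC (len p must divide 40 and be positive)
set_option maxHeartbeats 1000000 in
theorem pv_B_count (answers p : List Int) (hdvd : p.length ∣ 40) (hp : p ≠ []) :
    (PySem.List.pyRange 0 40 1).foldl
        (fun s r =>
          s + ((PySem.List.enumerate answers).foldl
                (fun d ia =>
                  let key := (PySem.Int.mod ia.1 40, ia.2)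
                  d.insert key (d.getD key 0 + 1))
                (PySem.Dict.empty : PySem.Dict (Int × Int) Int)).getD
              (r, PySem.List.pyGetD p (PySem.Int.mod r (p.length : Int)) 0) 0)
        0
      = pvC p answers := by
  have hlen : 0 < p.length := List.length_pos_iff.mpr hp
  -- the histogram fold is a counter over the mapped key list
  have hhist : (PySem.List.enumerate answers).foldl
      (fun d ia =>
        let key := (PySem.Int.mod ia.1 40, ia.2)
        d.insert key (d.getD key 0 + 1))
      (PySem.Dict.empty : PySem.Dict (Int × Int) Int)
    = ((PySem.List.enumerate answers).map
        (fun ia => (PySem.Int.mod ia.1 40, ia.2))).foldl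
        (fun d x => d.insert x (d.getD x 0 + 1)) PySem.Dict.empty := by
    rw [List.foldl_map]
  rw [hhist]
  set keys := (PySem.List.enumerate answers).map (fun ia => (PySem.Int.mod ia.1 40, ia.2)) with hkeys
  have hget : ∀ v : Int × Int,
      (keys.foldl (fun d x => d.insert x (d.getD x 0 + 1))
        (PySem.Dict.empty : PySem.Dict (Int × Int) Int)).getD v 0 = (keys.count v : Int) := by
    intro v
    rw [PySem.Dict.getD_foldl_insert_add_one, PySem.Dict.getD_empty]
    ring
  have hfold : (PySem.List.pyRange 0 40 1).foldl
      (fun s r =>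
        s + (keys.foldl (fun d x => d.insert x (d.getD x 0 + 1))
              (PySem.Dict.empty : PySem.Dict (Int × Int) Int)).getD
            (r, PySem.List.pyGetD p (PySem.Int.mod r (p.length : Int)) 0) 0)
      0
    = ((PySem.List.pyRange 0 40 1).map
        (fun r => (keys.count (r, PySem.List.pyGetD p (PySem.Int.mod r (p.length : Int)) 0) : Int))).sum := by
    rw [PySem.List.foldl_congr_mem
          (l := PySem.List.pyRange 0 40 1)
          (init := (0 : Int))
          (f := fun s r =>
            s + (keys.foldl (fun d x => d.insert x (d.getD x 0 + 1))
                  (PySem.Dict.empty : PySem.Dict (Int × Int) Int)).getD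
                (r, PySem.List.pyGetD p (PySem.Int.mod r (p.length : Int)) 0) 0)
          (g := fun s r =>
            s + (keys.count (r, PySem.List.pyGetD p (PySem.Int.mod r (p.length : Int)) 0) : Int))
          (by intro acc x _; simp only [hget]),
        PySem.List.foldl_add, zero_add]
  rw [hfold,
      pv_sum_count (fun r => PySem.List.pyGetD p (PySem.Int.mod r (p.length : Int)) 0)
        (PySem.List.pyRange 0 40 1) (PySem.List.nodup_pyRange_one 0 40) keys]
  -- now reduce the countP over the key list to pvC
  rw [hkeys, List.countP_map,
      PySem.List.enumerate_eq_map_pyRange (d := 0), List.countP_map]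
  rw [PySem.List.len_eq, PySem.List.pyRange_zero_natCast, List.countP_map]
  unfold pvC
  congr 1
  apply List.countP_congr
  intro k hk
  have hk' : k < answers.length := List.mem_range.mp hk
  simp only [Function.comp, decide_eq_true_eq]
  have h40 : PySem.Int.mod ((k : Nat) : Int) 40 = ((k % 40 : Nat) : Int) := by
    exact_mod_cast PySem.Int.mod_natCast k 40
  rw [h40]
  rw [PySem.Int.mod_natCast]
  rw [PySem.List.pyGetD_natCast]
  rw [PySem.List.pyGetD_natCast]
  have hm40 : ((k % 40 : Nat) : Int) ∈ PySem.List.pyRange 0 40 1 := by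
    have h1 : k % 40 < 40 := Nat.mod_lt k (by norm_num)
    rw [PySem.List.mem_pyRange_one]
    omega
  have hmm : (k % 40) % p.length = k % p.length := Nat.mod_mod_of_dvd k hdvd
  constructor
  · rintro ⟨_, hv⟩
    rw [hv, hmm]
  · intro hv
    exact ⟨hm40, by rw [hmm, hv]⟩

-- ===== VERDICT (by name: the statement is the Claim_ definition above) =====
theorem solution_spec : Claim_equal_solution := by
  intro answers _
  unfold Spec_solution solution solution_alt
  simp only [List.map_cons, List.map_nil]
  rw [pv_foldl_triple (PySem.List.pyRange 0 (answers.length : Int) 1)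
      (fun i => PySem.List.pyGetD answers i 0
        = PySem.List.pyGetD ((List.replicate answers.length ([1,2,3,4,5] : List Int)).flatten) i 0)
      (fun i => PySem.List.pyGetD answers i 0
        = PySem.List.pyGetD ((List.replicate answers.length ([2,1,2,3,2,4,2,5] : List Int)).flatten) i 0)
      (fun i => PySem.List.pyGetD answers i 0
        = PySem.List.pyGetD ((List.replicate answers.length ([3,3,1,1,2,2,4,4,5,5] : List Int)).flatten) i 0)
      0 0 0]
  rw [pv_A_count answers [1,2,3,4,5] (by simp),
      pv_A_count answers [2,1,2,3,2,4,2,5] (by simp),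
      pv_A_count answers [3,3,1,1,2,2,4,4,5,5] (by simp)]
  simp only [pv_B_count answers [1,2,3,4,5] (by norm_num) (by simp),
      pv_B_count answers [2,1,2,3,2,4,2,5] (by norm_num) (by simp),
      pv_B_count answers [3,3,1,1,2,2,4,4,5,5] (by norm_num) (by simp)]
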